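-- pv_equiv track=rewrite | github.com/DanielChung520/AI-Box | services/api/processors/chunk_processor.py | _detect_code_blocks
-- ===== SOURCE A (Python) =====
-- from typing import Any, Dict, List, Optional
--
-- def _detect_code_blocks(text: str) -> List[tuple[int, int]]:
--     """
--     檢測代碼塊（包括 Mermaid）的位置範圍
--
--     Args:
--         text: 文本內容
--
--     Returns:
--         代碼塊位置列表，每個元素為 (start_char_index, end_char_index)
--     """
--     code_blocks: List[tuple[int, int]] = []
--     lines = text.split("\n")
--     current_block_start: Optional[int] = None
--     current_char_pos = 0
--
--     for i, line in enumerate(lines):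
--         line_with_newline = line + "\n"
--         line_stripped = line.strip()
--
--         # 檢測代碼塊標記（```）
--         if line_stripped.startswith("```"):
--             if current_block_start is None:
--                 # 開始新的代碼塊
--                 current_block_start = current_char_pos
--             else:
--                 # 結束當前代碼塊（包含結束的 ```）
--                 code_blocks.append(
--                     (current_block_start, current_char_pos + len(line_with_newline))
--                 )
--                 current_block_start = None
--
--         current_char_pos += len(line_with_newline)
--
--     # 處理未閉合的代碼塊（如果有的話）
--     if current_block_start is not None:
--         code_blocks.append((current_block_start, len(text)))
--
--     return code_blocks
-- ===== SOURCE B (Python) =====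
-- from typing import List
--
--
-- def _detect_code_blocks(text: str) -> List[tuple[int, int]]:
--     lines = text.split("\n")
--     # offset table: offsets[i] = start char index of line i, each line counted as len+1
--     offsets = [0]
--     t = 0
--     for line in lines:
--         t += len(line) + 1
--         offsets.append(t)
--     # indices of fence lines
--     fences = [i for i, line in enumerate(lines) if line.strip().startswith("```")]
--     # pair fences two at a time
--     blocks: List[tuple[int, int]] = []
--     it = iter(fences)
--     for o in it:
--         c = next(it, None)
--         if c is None:
--             blocks.append((offsets[o], len(text)))
--         else:
--             blocks.append((offsets[o], offsets[c + 1]))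
--     return blocks
-- ===== Notes on version B (the rewrite author's own statement) =====
-- stated objective: alternative
-- what changed: Replaces A's single stateful open/close toggle scan with an index-table decomposition: build a prefix-sum offset table and the list of fence-line indices, then pair the fence indices two at a time to emit the block ranges.
import Mathlib
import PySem

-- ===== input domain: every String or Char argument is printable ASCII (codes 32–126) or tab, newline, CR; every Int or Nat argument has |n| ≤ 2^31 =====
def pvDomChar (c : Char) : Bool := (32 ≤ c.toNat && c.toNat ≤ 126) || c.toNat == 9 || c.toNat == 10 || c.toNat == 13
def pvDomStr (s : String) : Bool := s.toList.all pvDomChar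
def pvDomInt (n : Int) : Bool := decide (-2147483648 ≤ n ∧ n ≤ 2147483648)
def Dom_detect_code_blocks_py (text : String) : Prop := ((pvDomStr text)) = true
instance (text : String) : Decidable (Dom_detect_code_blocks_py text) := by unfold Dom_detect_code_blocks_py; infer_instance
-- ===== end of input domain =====

-- B replaces A's stateful open/close toggle scan by an offset prefix table plus a
-- pairing pass over the list of fence-line indices (objective: alternative decomposition).

-- ===== PORT A =====
-- the for-loop of A: state = (current_block_start, current_char_pos); returns
-- (accumulated code_blocks in order, final current_block_start)
def pvLoopA : List String → Option Int → Int → (List (Int × Int) × Option Int)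
  | [], st, _ => ([], st)
  | l :: ls, st, pos =>
      let lwn := l ++ "\n"                                  -- line_with_newline
      if PySem.Str.startswith (PySem.Str.strip l) "```" then
        match st with
        | none => pvLoopA ls (some pos) (pos + PySem.Str.len lwn)
        | some s =>
            let r := pvLoopA ls none (pos + PySem.Str.len lwn)
            ((s, pos + PySem.Str.len lwn) :: r.1, r.2)
      else pvLoopA ls st (pos + PySem.Str.len lwn)

def detect_code_blocks_py (text : String) : List (Int × Int) :=
  -- text.split("\n"): sep is the nonempty literal "\n", so split? is always some
  let lines := (PySem.Str.split? text "\n").getD []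
  let r := pvLoopA lines none 0
  match r.2 with
  | none => r.1
  | some s => r.1 ++ [(s, PySem.Str.len text)]              -- unclosed block

-- ===== PORT B =====
-- offsets table: running `t += len(line) + 1; offsets.append(t)` (offsets = 0 :: this)
def pvOffsetsGo : List String → Int → List Int
  | [], _ => []
  | l :: ls, t => (t + PySem.Str.len l + 1) :: pvOffsetsGo ls (t + PySem.Str.len l + 1)

-- the pairing loop over the fences list, two indices at a time
def pvPairB (offsets : List Int) (L : Int) : List Int → List (Int × Int)
  | [] => []
  | [o] => [(PySem.List.pyGetD offsets o 0, L)]             -- c is None: unclosed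
  | o :: c :: rest =>
      (PySem.List.pyGetD offsets o 0, PySem.List.pyGetD offsets (c + 1) 0) :: pvPairB offsets L rest

def detect_code_blocks_py_alt (text : String) : List (Int × Int) :=
  let lines := (PySem.Str.split? text "\n").getD []
  let offsets := 0 :: pvOffsetsGo lines 0
  let fences := ((PySem.List.enumerate lines).filter
      (fun p => PySem.Str.startswith (PySem.Str.strip p.2) "```")).map (·.1)
  pvPairB offsets (PySem.Str.len text) fences

-- ===== PRECONDITION & SPEC =====
def Spec_detect_code_blocks_py (text : String) (out : List (Int × Int)) : Prop := out = detect_code_blocks_py_alt text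
instance (text : String) (out : List (Int × Int)) : Decidable (Spec_detect_code_blocks_py text out) := by unfold Spec_detect_code_blocks_py; infer_instance

-- ===== CLAIM (what is proved, stated in full; the proofs are below) =====
def Claim_equal_detect_code_blocks_py : Prop := ∀ (text : String), Dom_detect_code_blocks_py text → Spec_detect_code_blocks_py text (detect_code_blocks_py text)

-- ===== LEMMAS AND PROOFS =====

-- fence test, abbreviated for the proofs
def pvFence (l : String) : Bool := PySem.Str.startswith (PySem.Str.strip l) "```"

-- the (start, end-with-newline) events of the fence lines, in order
def pvE : List String → Int → List (Int × Int)
  | [], _ => []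
  | l :: ls, pos =>
      if pvFence l then (pos, pos + (PySem.Str.len l + 1)) :: pvE ls (pos + (PySem.Str.len l + 1))
      else pvE ls (pos + (PySem.Str.len l + 1))

-- A's toggle, rephrased on the event list
def pvPairSt : List (Int × Int) → Option Int → (List (Int × Int) × Option Int)
  | [], st => ([], st)
  | (a, _) :: es, none => pvPairSt es (some a)
  | (_, b) :: es, some s =>
      let r := pvPairSt es none
      ((s, b) :: r.1, r.2)

-- two-at-a-time pairing of the event list
def pvPairE (L : Int) : List (Int × Int) → List (Int × Int)
  | [] => []
  | [(a, _)] => [(a, L)]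
  | (a, _) :: (_, d) :: rest => (a, d) :: pvPairE L rest

-- indices (from k) of the fence lines
def pvFidx : List String → Nat → List Nat
  | [], _ => []
  | l :: ls, k => if pvFence l then k :: pvFidx ls (k + 1) else pvFidx ls (k + 1)

-- prefix sums of len(line)+1
def pvPref : List String → Nat → Int
  | _, 0 => 0
  | [], _ + 1 => 0
  | l :: ls, n + 1 => PySem.Str.len l + 1 + pvPref ls n

theorem pvStrLen_newline (l : String) : PySem.Str.len (l ++ "\n") = PySem.Str.len l + 1 := by
  rw [PySem.Str.len_append]; simp [PySem.Str.len_eq]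

theorem pvLoopA_eq_pairSt (ls : List String) : ∀ (st : Option Int) (pos : Int),
    pvLoopA ls st pos = pvPairSt (pvE ls pos) st := by
  induction ls with
  | nil => intro st pos; rfl
  | cons l ls ih =>
      intro st pos
      simp only [pvLoopA, pvE, pvFence, pvStrLen_newline]
      by_cases h : PySem.Str.startswith (PySem.Str.strip l) "```" = true
      · rw [if_pos h, if_pos h]
        cases st with
        | none => simp only [ih]; rfl
        | some s => simp only [ih]; rfl
      · rw [if_neg h, if_neg h]
        exact ih st _

theorem pvPairSt_post (L : Int) : ∀ (es : List (Int × Int)),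
    (match (pvPairSt es none).2 with
      | none => (pvPairSt es none).1
      | some s => (pvPairSt es none).1 ++ [(s, L)]) = pvPairE L es := by
  intro es
  fun_induction pvPairE L es with
  | case1 => rfl
  | case2 a b => rfl
  | case3 a b c d rest ih =>
      simp only [pvPairSt]
      cases hr : (pvPairSt rest none).2 <;> simp_all

theorem pvFidx_shift (ls : List String) : ∀ (k : Nat),
    pvFidx ls (k + 1) = (pvFidx ls k).map (· + 1) := by
  induction ls with
  | nil => intro k; rfl
  | cons l ls ih =>
      intro k
      simp only [pvFidx]
      by_cases h : pvFence l <;> simp [h, ih]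

theorem pvFidx_lt (ls : List String) : ∀ (k i : Nat), i ∈ pvFidx ls k → i < k + ls.length := by
  induction ls with
  | nil => intro k i h; simp [pvFidx] at h
  | cons l ls ih =>
      intro k i h
      simp only [pvFidx] at h
      by_cases hf : pvFence l
      · rw [if_pos hf] at h
        rcases List.mem_cons.mp h with rfl | h2
        · simp only [List.length_cons]; omega
        · have := ih (k + 1) i h2; simp [List.length_cons]; omega
      · rw [if_neg hf] at h
        have := ih (k + 1) i h; simp [List.length_cons]; omega

theorem pvE_eq_map_fidx (ls : List String) : ∀ (pos : Int),
    pvE ls pos = (pvFidx ls 0).map (fun i => (pos + pvPref ls i, pos + pvPref ls (i + 1))) := by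
  induction ls with
  | nil => intro pos; rfl
  | cons l ls ih =>
      intro pos
      simp only [pvE, pvFidx]
      by_cases h : pvFence l
      · rw [if_pos h, if_pos h, pvFidx_shift ls 0]
        simp only [List.map_cons, List.map_map]
        rw [ih (pos + (PySem.Str.len l + 1))]
        congr 1
        · simp [pvPref]
        · apply List.map_congr_left; intro i _
          simp only [Function.comp, pvPref, Prod.ext_iff]
          constructor <;> ring
      · rw [if_neg h, if_neg h, pvFidx_shift ls 0]
        simp only [List.map_map]
        rw [ih (pos + (PySem.Str.len l + 1))]
        apply List.map_congr_left; intro i _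
        simp only [Function.comp, pvPref, Prod.ext_iff]
        constructor <;> ring

theorem pvOffsets_getD (ls : List String) : ∀ (t : Int) (n : Nat), n < ls.length →
    (pvOffsetsGo ls t).getD n 0 = t + pvPref ls (n + 1) := by
  induction ls with
  | nil => intro t n h; simp at h
  | cons l ls ih =>
      intro t n h
      cases n with
      | zero => simp [pvOffsetsGo, pvPref]; ring
      | succ m =>
          simp only [pvOffsetsGo, List.getD_cons_succ]
          rw [ih (t + PySem.Str.len l + 1) m (by simpa using h)]
          simp [pvPref]; ring

theorem pvOffsetsFull_getD (ls : List String) (n : Nat) (h : n ≤ ls.length) :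
    (0 :: pvOffsetsGo ls 0).getD n 0 = pvPref ls n := by
  cases n with
  | zero => simp [pvPref]
  | succ m =>
      simp only [List.getD_cons_succ]
      rw [pvOffsets_getD ls 0 m (by omega)]
      ring

theorem pvFences_eq (ls : List String) : ∀ (k : Nat),
    ((PySem.List.enumerate ls (k : Int)).filter
        (fun p => PySem.Str.startswith (PySem.Str.strip p.2) "```")).map (·.1)
      = (pvFidx ls k).map (fun (n : Nat) => (n : Int)) := by
  induction ls with
  | nil => intro k; rfl
  | cons l ls ih =>
      intro k
      rw [PySem.List.enumerate_cons]
      have hc : (k : Int) + 1 = ((k + 1 : Nat) : Int) := by push_cast; ring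
      simp only [pvFidx, List.filter_cons]
      by_cases h : PySem.Str.startswith (PySem.Str.strip l) "```" = true
      · have hf : pvFence l = true := h
        rw [if_pos h, if_pos hf]
        simp only [List.map_cons]
        rw [hc, ih (k + 1)]
      · have hf : ¬ pvFence l = true := h
        rw [if_neg h, if_neg hf, hc, ih (k + 1)]

theorem pvPairB_eq_pairE_map (offsets : List Int) (L : Int) : ∀ (fs : List Nat),
    pvPairB offsets L (fs.map (fun (n : Nat) => (n : Int)))
      = pvPairE L (fs.map (fun n => (offsets.getD n 0, offsets.getD (n + 1) 0)))
  | [] => rfl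
  | [n] => by simp [pvPairB, pvPairE]
  | n :: m :: fs' => by
      have hc : ((m : Int)) + 1 = ((m + 1 : Nat) : Int) := by push_cast; ring
      simp only [List.map_cons, pvPairB, pvPairE]
      rw [hc]
      simp only [PySem.List.pyGetD_natCast]
      rw [pvPairB_eq_pairE_map offsets L fs']

-- the core equality, over an arbitrary line list
theorem pvMain (lines : List String) (L : Int) :
    (match (pvLoopA lines none 0).2 with
      | none => (pvLoopA lines none 0).1
      | some s => (pvLoopA lines none 0).1 ++ [(s, L)])
    = pvPairB (0 :: pvOffsetsGo lines 0) L
        (((PySem.List.enumerate lines).filter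
            (fun p => PySem.Str.startswith (PySem.Str.strip p.2) "```")).map (·.1)) := by
  have henum : (PySem.List.enumerate lines : List (Int × String))
      = PySem.List.enumerate lines ((0 : Nat) : Int) := by norm_num
  rw [pvLoopA_eq_pairSt, pvPairSt_post, henum, pvFences_eq, pvPairB_eq_pairE_map,
      pvE_eq_map_fidx]
  congr 1
  apply List.map_congr_left
  intro i hi
  have hlt : i < lines.length := by simpa using pvFidx_lt lines 0 i hi
  rw [pvOffsetsFull_getD lines i (by omega), pvOffsetsFull_getD lines (i + 1) (by omega)]
  simp

-- ===== VERDICT (by name: the statement is the Claim_ definition above) =====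
theorem detect_code_blocks_py_spec : Claim_equal_detect_code_blocks_py := by
  intro text _
  unfold Spec_detect_code_blocks_py detect_code_blocks_py detect_code_blocks_py_alt
  exact pvMain _ _
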